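-- pv_equiv track=rewrite | github.com/JoeS51/LC-solutions | python/arrays/transform-array-all-equal-elements.py | canMakeEqual
-- ===== SOURCE A (Python) =====
-- from typing import List
--
-- def canMakeEqual(nums: List[int], k: int) -> bool:
--     def countEqual(nums, switch_num):
--         # count distances between each
--         prev = -1
--         res = 0
--         for i, val in enumerate(nums):
--             if val == switch_num and prev == -1:
--                 prev = i
--             elif val == switch_num:
--                 res += i - prev
--                 prev = -1
--         return res
--
--     count_neg = 0
--     count_pos = 0
--     for i in nums:
--         if i < 0:
--             count_neg += 1
--         else:
--             count_pos += 1
--     if count_neg % 2 != 0 and count_pos % 2 != 0: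
--         return False
--     switch_num = -1
--     if count_neg % 2 == 0 and count_pos % 2 == 0:
--         switch_num = -1 if count_neg < count_pos else 1
--         res = min(countEqual(nums, 1), countEqual(nums, -1))
--         if res <= k:
--             return True
--         else:
--             return False
--     elif count_pos % 2 == 0:
--         switch_num = 1
--
--     res = countEqual(nums, switch_num)
--     if res <= k:
--         return True
--     else:
--         return False
-- ===== SOURCE B (Python) =====
-- from typing import List
--
-- def canMakeEqual(nums: List[int], k: int) -> bool:
--     def cost(t):
--         # operations for target t = number of boundary positions whose prefix
--         # contains an odd number of t's, scanned only up to the last occurrence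
--         # when the total count is odd (that trailing occurrence stays unpaired)
--         c = nums.count(t)
--         if c % 2 == 0:
--             limit = len(nums)
--         else:
--             limit = len(nums) - 1 - nums[::-1].index(t)
--         odd = 0
--         total = 0
--         for v in nums[:limit]:
--             odd ^= (v == t)
--             total += odd
--         return total
--
--     neg = sum(v < 0 for v in nums)
--     nonneg = len(nums) - neg
--     costs = [cost(t) for t, c in ((1, nonneg), (-1, neg)) if c % 2 == 0]
--     return bool(costs) and min(costs) <= k
-- ===== Notes on version B (the rewrite author's own statement) =====
-- stated objective: alternative
-- what changed: B counts, for each candidate target, the boundary positions whose prefix holds an odd number of target occurrences (truncating at the last occurrence when the count is odd) instead of A's sentinel-state gap summation, and replaces A's branch ladder by filtering the candidate targets by parity and taking the min of the surviving costs.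
import Mathlib
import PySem

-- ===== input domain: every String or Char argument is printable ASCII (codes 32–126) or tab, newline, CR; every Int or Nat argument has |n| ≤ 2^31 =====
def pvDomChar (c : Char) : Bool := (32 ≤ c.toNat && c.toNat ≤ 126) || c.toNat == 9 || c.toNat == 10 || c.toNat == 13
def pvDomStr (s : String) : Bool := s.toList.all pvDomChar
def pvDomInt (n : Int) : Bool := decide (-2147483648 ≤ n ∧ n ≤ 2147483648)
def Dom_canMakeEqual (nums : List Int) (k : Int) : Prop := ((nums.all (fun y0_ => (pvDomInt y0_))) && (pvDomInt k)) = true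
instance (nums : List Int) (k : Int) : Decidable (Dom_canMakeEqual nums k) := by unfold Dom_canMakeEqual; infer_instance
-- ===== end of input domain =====

-- B counts boundary positions with odd prefix-count of the target (truncated at the last
-- occurrence when the count is odd) instead of A's sentinel-state gap summation, and picks
-- the candidate targets by parity filtering (objective: alternative, same cost).

-- ===== PORT A =====
-- inner helper countEqual: for-loop over enumerate(nums) with state (prev, res)
def countEqualA (nums : List Int) (switchNum : Int) : Int :=
  (PySem.List.enumerate nums).foldl
    (fun (st : Int × Int) (p : Int × Int) =>
      if p.2 == switchNum && st.1 == -1 then (p.1, st.2)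
      else if p.2 == switchNum then (-1, st.2 + (p.1 - st.1))
      else st)
    (-1, 0) |>.2

def canMakeEqual (nums : List Int) (k : Int) : Bool :=
  let counts := nums.foldl
    (fun (c : Int × Int) i => if i < 0 then (c.1 + 1, c.2) else (c.1, c.2 + 1)) (0, 0)
  let countNeg := counts.1
  let countPos := counts.2
  if PySem.Int.mod countNeg 2 != 0 && PySem.Int.mod countPos 2 != 0 then false
  else if PySem.Int.mod countNeg 2 == 0 && PySem.Int.mod countPos 2 == 0 then
    decide (min (countEqualA nums 1) (countEqualA nums (-1)) ≤ k)
  else if PySem.Int.mod countPos 2 == 0 then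
    decide (countEqualA nums 1 ≤ k)
  else
    decide (countEqualA nums (-1) ≤ k)

-- ===== PORT B =====
-- one step of cost's loop: odd ^= (v == t); total += odd   (odd is the 0/1 parity bit)
def pfStep (t : Int) (st : Bool × Int) (v : Int) : Bool × Int :=
  let o := xor st.1 (v == t)
  (o, st.2 + if o then 1 else 0)

-- cost(t): prefix-parity boundary count over nums[:limit]
def costB (nums : List Int) (t : Int) : Int :=
  let c : Int := (PySem.List.count nums t : Int)
  let limit : Int :=
    if PySem.Int.mod c 2 == 0 then (nums.length : Int)
    else (nums.length : Int) - 1 -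
      (match PySem.List.index? nums.reverse t with
       | some j => (j : Int)
       | none => 0)   -- unreachable: an odd count means t occurs in nums (Python's .index would raise only here)
  (PySem.List.slice nums none (some limit)).foldl (pfStep t) (false, 0) |>.2

def canMakeEqual_alt (nums : List Int) (k : Int) : Bool :=
  let neg : Int := (nums.filter (fun v => v < 0)).length   -- sum(v < 0 for v in nums)
  let nonneg : Int := (nums.length : Int) - neg
  let costs := ([((1 : Int), nonneg), (-1, neg)].filter
      (fun p => PySem.Int.mod p.2 2 == 0)).map (fun p => costB nums p.1)
  match PySem.List.min? costs (fun x => x) with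
  | none => false
  | some m => decide (m ≤ k)

-- ===== PRECONDITION & SPEC =====
def Spec_canMakeEqual (nums : List Int) (k : Int) (out : Bool) : Prop := out = canMakeEqual_alt nums k
instance (nums : List Int) (k : Int) (out : Bool) : Decidable (Spec_canMakeEqual nums k out) := by unfold Spec_canMakeEqual; infer_instance

-- ===== CLAIM (what is proved, stated in full; the proofs are below) =====
def Claim_equal_canMakeEqual : Prop := ∀ (nums : List Int) (k : Int), Dom_canMakeEqual nums k → Spec_canMakeEqual nums k (canMakeEqual nums k)

-- ===== LEMMAS AND PROOFS =====

-- sum of gaps between consecutively paired elements (trailing unpaired element ignored)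
def pairGapSum : List Int → Int
  | a :: b :: t => (b - a) + pairGapSum t
  | _ => 0

-- positions (with offset) of the occurrences of t
def posFrom (t off : Int) : List Int → List Int
  | [] => []
  | v :: l => if v == t then off :: posFrom t (off + 1) l else posFrom t (off + 1) l

-- tail correction of the prefix-parity count: an unpaired open interval reaching the bound
def tailE (bound : Int) (P : List Int) : Int :=
  if P.length % 2 = 1 then bound - P.getLastD 0 else 0

theorem posFrom_append (t : Int) (l₁ l₂ : List Int) : ∀ off,
    posFrom t off (l₁ ++ l₂) = posFrom t off l₁ ++ posFrom t (off + l₁.length) l₂ := by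
  induction l₁ with
  | nil => intro off; simp [posFrom]
  | cons x xs ih =>
    intro off
    simp only [List.cons_append, posFrom, ih (off + 1)]
    split_ifs <;> simp <;> ring_nf
  
theorem length_posFrom (t : Int) : ∀ (l : List Int) (off : Int),
    (posFrom t off l).length = l.count t := by
  intro l
  induction l with
  | nil => intro off; simp [posFrom]
  | cons x xs ih =>
    intro off
    by_cases hx : x = t
    · simp [posFrom, hx, ih]
    · simp [posFrom, hx, ih, beq_iff_eq]

-- A-side invariant of the sentinel loop (all enumerate indices are ≥ 0, so a set prev ≠ -1)
theorem countEqualA_inv (l : List (Int × Int)) (t : Int) (prev res : Int)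
    (hl : ∀ p ∈ l, 0 ≤ p.1) :
    (l.foldl (fun (st : Int × Int) (p : Int × Int) =>
        if p.2 == t && st.1 == -1 then (p.1, st.2)
        else if p.2 == t then (-1, st.2 + (p.1 - st.1))
        else st) (prev, res)).2
      = res + pairGapSum ((if prev == -1 then [] else [prev]) ++
            ((l.filter (fun p => p.2 == t)).map (fun p => p.1))) := by
  induction l generalizing prev res with
  | nil =>
    by_cases h : prev == -1 <;> simp [h, pairGapSum]
  | cons x xs ih =>
    have hx : 0 ≤ x.1 := hl x (List.mem_cons_self ..)
    have hxs : ∀ p ∈ xs, 0 ≤ p.1 := fun p hp => hl p (List.mem_cons_of_mem _ hp)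
    have hx1 : (x.1 == -1) = false := by rw [beq_eq_false_iff_ne]; omega
    simp only [List.foldl_cons, List.filter_cons]
    by_cases hm : x.2 == t
    · by_cases hp : prev == -1
      · simp only [hm, hp, Bool.and_self, if_true]
        rw [ih _ _ hxs]
        simp [hx1]
      · have hp' : (prev == -1) = false := by simpa using hp
        simp only [hm, hp', Bool.and_false, Bool.false_eq_true, if_false, if_true]
        rw [ih _ _ hxs]
        simp [pairGapSum]
        ring
    · have hm' : (x.2 == t) = false := by simpa using hm
      simp only [hm', Bool.false_and, Bool.false_eq_true, if_false]
      rw [ih _ _ hxs]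

theorem enum_positions_eq_posFrom (t : Int) : ∀ (l : List Int) (off : Int),
    ((PySem.List.enumerate l off).filter (fun p => p.2 == t)).map (fun p => p.1)
      = posFrom t off l := by
  intro l
  induction l with
  | nil => intro off; simp [posFrom, PySem.List.enumerate]
  | cons x xs ih =>
    intro off
    rw [PySem.List.enumerate_cons]
    by_cases hx : x = t
    · simp [posFrom, hx, ih]
    · simp [posFrom, hx, beq_iff_eq, ih]

theorem countEqualA_eq_pgs (nums : List Int) (t : Int) :
    countEqualA nums t = pairGapSum (posFrom t 0 nums) := by
  unfold countEqualA
  have h := countEqualA_inv (PySem.List.enumerate nums) t (-1) 0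
    (by
      intro p hp
      rcases (PySem.List.mem_enumerate_iff _ _ _).1 hp with ⟨j, hj, rfl⟩
      simp)
  simp only [h]
  simp [enum_positions_eq_posFrom]

-- the tail correction ignores the first element of a list of length ≥ 2
theorem tailE_shift_head (bound x y q : Int) (r : List Int) :
    tailE bound (x :: q :: r) = tailE bound (y :: q :: r) := by
  simp [tailE, List.getLastD_eq_getLast?, List.getLast?_cons_cons]

theorem tailE_cons_cons (bound x y : Int) (pos : List Int) :
    tailE bound (x :: y :: pos) = tailE bound pos := by
  cases pos with
  | nil => simp [tailE]
  | cons q r =>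
    unfold tailE
    have h2 : (x :: y :: q :: r).length % 2 = (q :: r).length % 2 := by
      simp only [List.length_cons]; omega
    have h3 : (x :: y :: q :: r).getLastD 0 = (q :: r).getLastD 0 := by
      simp [List.getLastD_eq_getLast?, List.getLast?_cons_cons]
    rw [h2, h3]

-- moving the virtual open position one step left costs exactly the 1 added by the loop
theorem shiftA (bound off s : Int) (pos : List Int) :
    (s + 1) + pairGapSum ((off + 1) :: pos) + tailE bound ((off + 1) :: pos)
      = s + pairGapSum (off :: pos) + tailE bound (off :: pos) := by
  cases pos with
  | nil => simp [pairGapSum, tailE, List.getLastD]; ring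
  | cons q r =>
    rw [tailE_shift_head bound (off + 1) off q r]
    simp only [pairGapSum]
    ring

-- closing an interval of length 0 (open and close at the same position) adds nothing
theorem closeB (bound off s : Int) (pos : List Int) :
    s + pairGapSum pos + tailE bound pos
      = s + pairGapSum (off :: off :: pos) + tailE bound (off :: off :: pos) := by
  rw [tailE_cons_cons]
  simp only [pairGapSum]
  ring

-- B-side invariant of the prefix-parity loop
theorem pf_inv (t : Int) : ∀ (l : List Int) (off s : Int) (b : Bool),
    (l.foldl (pfStep t) (b, s)).2
      = s + pairGapSum ((if b then [off] else []) ++ posFrom t off l)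
          + tailE (off + l.length) ((if b then [off] else []) ++ posFrom t off l) := by
  intro l
  induction l with
  | nil =>
    intro off s b
    cases b <;> simp [posFrom, pairGapSum, tailE, List.getLastD]
  | cons v l' ih =>
    intro off s b
    have hlen : off + ((v :: l').length : Int) = (off + 1) + (l'.length : Int) := by
      simp [List.length_cons]; ring
    by_cases hv : v = t
    · cases b with
      | false =>
        rw [List.foldl_cons, show pfStep t (false, s) v = (true, s + 1) by simp [pfStep, hv]]
        rw [ih (off + 1) (s + 1) true, hlen]
        simp only [posFrom, hv, beq_self_eq_true, if_true, Bool.false_eq_true, if_false,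
          List.singleton_append, List.nil_append]
        exact shiftA _ _ _ _
      | true =>
        rw [List.foldl_cons, show pfStep t (true, s) v = (false, s) by simp [pfStep, hv]]
        rw [ih (off + 1) s false, hlen]
        simp only [posFrom, hv, beq_self_eq_true, if_true, Bool.false_eq_true, if_false,
          List.singleton_append, List.nil_append]
        exact closeB _ _ _ _
    · have hv' : (v == t) = false := by simpa using hv
      cases b with
      | false =>
        rw [List.foldl_cons, show pfStep t (false, s) v = (false, s) by simp [pfStep, hv']]
        rw [ih (off + 1) s false, hlen]
        simp only [posFrom, hv', Bool.false_eq_true, if_false, List.nil_append]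
      | true =>
        rw [List.foldl_cons, show pfStep t (true, s) v = (true, s + 1) by simp [pfStep, hv']]
        rw [ih (off + 1) (s + 1) true, hlen]
        simp only [posFrom, hv', Bool.false_eq_true, if_false, if_true,
          List.singleton_append]
        exact shiftA _ _ _ _

-- dropping an element appended after an even-length prefix does not change the pair-gap sum
theorem pgs_append_singleton_even : ∀ (p : List Int), p.length % 2 = 0 → ∀ x, pairGapSum (p ++ [x]) = pairGapSum p
  | [], _, x => by simp [pairGapSum]
  | [a], h, x => by simp at h
  | a :: b :: r, h, x => by
    have hr : r.length % 2 = 0 := by simp only [List.length_cons] at h; omega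
    simp only [List.cons_append, pairGapSum]
    rw [pgs_append_singleton_even r hr x]

-- the last occurrence, located through index? on the reversed list
theorem last_occ (t : Int) (l : List Int) (h : t ∈ l) :
    ∃ j : Nat, PySem.List.index? l.reverse t = some j ∧ j < l.length ∧
      posFrom t 0 l = posFrom t 0 (l.take (l.length - 1 - j)) ++ [((l.length - 1 - j : Nat) : Int)] := by
  induction l using List.reverseRecOn with
  | nil => simp at h
  | append_singleton xs a ih =>
    by_cases ha : a = t
    · subst ha
      refine ⟨0, ?_, by simp, ?_⟩
      · rw [List.reverse_append, List.reverse_singleton, List.singleton_append,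
          PySem.List.index?_cons_self]
      · have hm : (xs ++ [a]).length - 1 - 0 = xs.length := by simp
        rw [hm, posFrom_append, List.take_append_of_le_length le_rfl, List.take_length]
        simp [posFrom]
    · have ht : t ∈ xs := by
        rcases List.mem_append.1 h with h' | h'
        · exact h'
        · simp at h'; exact absurd h'.symm ha
      rcases ih ht with ⟨j, hidx, hjlt, heq⟩
      refine ⟨j + 1, ?_, ?_, ?_⟩
      · rw [List.reverse_append, List.reverse_singleton, List.singleton_append,
          PySem.List.index?_cons_of_ne _ ha, hidx]
        rfl
      · simp only [List.length_append, List.length_cons, List.length_nil]; omega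
      · have hm : (xs ++ [a]).length - 1 - (j + 1) = xs.length - 1 - j := by
          simp only [List.length_append, List.length_cons, List.length_nil]; omega
        have hlast : posFrom t (0 + (xs.length : Int)) [a] = [] := by
          simp [posFrom, ha]
        rw [hm, posFrom_append, hlast, List.append_nil,
          List.take_append_of_le_length (by omega)]
        exact heq

-- cost(t) computed by B equals the pair-gap sum of the occurrence positions
theorem costB_eq_pgs (nums : List Int) (t : Int) :
    costB nums t = pairGapSum (posFrom t 0 nums) := by
  simp only [costB]
  have hc : PySem.Int.mod ((PySem.List.count nums t : Nat) : Int) 2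
      = ((nums.count t % 2 : Nat) : Int) := by
    rw [PySem.List.count_eq]
    exact_mod_cast PySem.Int.mod_natCast (nums.count t) 2
  by_cases hpar : nums.count t % 2 = 0
  · -- even count: no truncation, no tail correction
    rw [hc, if_pos (show ((((nums.count t % 2 : Nat) : Int)) == 0) = true by simp [hpar])]
    rw [PySem.List.slice_to_natCast, List.take_length, pf_inv t nums 0 0 false]
    simp only [Bool.false_eq_true, if_false, List.nil_append]
    have hE : tailE (0 + (nums.length : Int)) (posFrom t 0 nums) = 0 := by
      unfold tailE
      rw [if_neg]
      rw [length_posFrom]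
      omega
    rw [hE]
    ring
  · -- odd count: truncate at the last occurrence, which stays unpaired
    have hmem : t ∈ nums := by
      by_contra hmem
      rw [List.count_eq_zero.2 hmem] at hpar
      exact hpar rfl
    rcases last_occ t nums hmem with ⟨j, hidx, hjlt, heq⟩
    rw [hc, if_neg (show ¬ ((((nums.count t % 2 : Nat) : Int)) == 0) = true by simp; omega)]
    have hmatch : (match PySem.List.index? nums.reverse t with
        | some j => (j : Int) | none => 0) = (j : Int) := by rw [hidx]
    rw [hmatch]
    have hcast : (nums.length : Int) - 1 - (j : Int) = ((nums.length - 1 - j : Nat) : Int) := by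
      omega
    rw [hcast, PySem.List.slice_to_natCast, pf_inv t _ 0 0 false]
    simp only [Bool.false_eq_true, if_false, List.nil_append]
    have hlenfull := congrArg List.length heq
    rw [List.length_append, List.length_cons, List.length_nil, length_posFrom,
      length_posFrom] at hlenfull
    have hevens : ((nums.take (nums.length - 1 - j)).count t) % 2 = 0 := by omega
    have hE : tailE (0 + ((nums.take (nums.length - 1 - j)).length : Int))
        (posFrom t 0 (nums.take (nums.length - 1 - j))) = 0 := by
      unfold tailE
      rw [if_neg]
      rw [length_posFrom]
      omega
    rw [hE, heq, pgs_append_singleton_even _ (by rw [length_posFrom]; omega)]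
    ring

theorem cost_agree (nums : List Int) (t : Int) : countEqualA nums t = costB nums t := by
  rw [countEqualA_eq_pgs, costB_eq_pgs]

-- A's counting loop equals (number of negatives, number of non-negatives)
theorem countsA_eq (nums : List Int) (c : Int × Int) :
    nums.foldl (fun (c : Int × Int) i => if i < 0 then (c.1 + 1, c.2) else (c.1, c.2 + 1)) c
      = (c.1 + (nums.filter (fun v => v < 0)).length,
         c.2 + ((nums.length : Int) - (nums.filter (fun v => v < 0)).length)) := by
  induction nums generalizing c with
  | nil => simp
  | cons x xs ih =>
    simp only [List.foldl_cons, List.filter_cons]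
    by_cases hx : x < 0
    · simp [hx, ih, Prod.ext_iff]; omega
    · simp [hx, ih, Prod.ext_iff]; omega

theorem canMakeEqual_eq (nums : List Int) (k : Int) :
    canMakeEqual nums k = canMakeEqual_alt nums k := by
  unfold canMakeEqual canMakeEqual_alt
  rw [countsA_eq]
  simp only [cost_agree, zero_add]
  set n : Int := ((nums.filter (fun v => v < 0)).length : Int) with hn
  have h0 : 0 ≤ n := by positivity
  set m : Int := (nums.length : Int) - n with hm
  have hmod : ∀ a : Int, 0 ≤ a → PySem.Int.mod a 2 = a % 2 := by
    intro a _; exact PySem.Int.mod_eq_emod_of_pos (by norm_num)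
  have hm0 : 0 ≤ m := by
    have : n ≤ (nums.length : Int) := by
      rw [hn]; exact_mod_cast List.length_filter_le _ _
    omega
  rw [hmod n h0, hmod m hm0]
  have hn2 : n % 2 = 0 ∨ n % 2 = 1 := Int.emod_two_eq_zero_or_one n
  have hm2 : m % 2 = 0 ∨ m % 2 = 1 := Int.emod_two_eq_zero_or_one m
  have hnone : PySem.List.min? ([] : List Int) (fun x => x) = none := by rfl
  rcases hn2 with h1 | h1 <;> rcases hm2 with h2 | h2 <;>
    simp [h1, h2, PySem.List.min?_id_cons, List.foldl, hnone]

-- ===== VERDICT (by name: the statement is the Claim_ definition above) =====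
theorem canMakeEqual_spec : Claim_equal_canMakeEqual := by
  intro nums k _
  unfold Spec_canMakeEqual
  exact canMakeEqual_eq nums k
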